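-- pv_equiv track=rewrite | github.com/proloypoddar/Data-Structure | FALL_23/LAB/lab1.py | waveYourFlag
-- ===== SOURCE A (Python) =====
-- def waveYourFlag(arr):
--     n = len(arr)
--     for i in range(0, n - 1):
--         if arr[i] % 2 == 0:
--             if arr[i + 1] % 2 != 0:
--                 arr[i], arr[i + 1] = arr[i + 1], arr[i]
--         else:
--             if arr[i + 1] % 2 == 0:
--                 arr[i], arr[i + 1] = arr[i + 1], arr[i]
--     return arr
-- ===== SOURCE B (Python) =====
-- def waveYourFlag(arr):
--     # Carry sweep: instead of indexed adjacent swaps, keep the element still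
--     # "travelling" right (carry) and emit the others; mutates arr in place
--     # like A and returns it.
--     if not arr:
--         return arr
--     carry = arr[0]
--     result = []
--     for e in arr[1:]:
--         if carry % 2 != e % 2:
--             result.append(e)
--         else:
--             result.append(carry)
--             carry = e
--     result.append(carry)
--     arr[:] = result
--     return arr
-- ===== Notes on version B (the rewrite author's own statement) =====
-- stated objective: alternative
-- what changed: Replaces A's indexed adjacent-swap loop (reading/writing arr[i], arr[i+1]) with a carry sweep that keeps the travelling element in a variable and appends the rest to a result list, then writes back in place.
import Mathlib
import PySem

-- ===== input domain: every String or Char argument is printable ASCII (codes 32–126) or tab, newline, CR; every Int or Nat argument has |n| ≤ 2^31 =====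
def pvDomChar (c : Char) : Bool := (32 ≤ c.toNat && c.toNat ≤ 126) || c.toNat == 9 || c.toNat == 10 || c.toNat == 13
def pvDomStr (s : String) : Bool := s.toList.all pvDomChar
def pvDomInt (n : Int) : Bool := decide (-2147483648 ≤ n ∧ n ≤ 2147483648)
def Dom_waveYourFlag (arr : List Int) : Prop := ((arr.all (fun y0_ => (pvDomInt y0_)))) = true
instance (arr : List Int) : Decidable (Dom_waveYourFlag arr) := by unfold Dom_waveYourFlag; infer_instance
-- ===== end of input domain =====

-- B replaces A's indexed adjacent-swap loop by a carry sweep building a result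
-- list (alternative decomposition, same O(n) cost); both Pythons mutate arr in
-- place to the same final contents and return it, so return-value equivalence
-- covers the observable effect.

-- ===== PORT A =====
-- loop body of A, named: one iteration at index i (reads arr[i], arr[i+1],
-- conditionally swaps); indices produced by range(0, n-1) are always in range,
-- so pyGetD/pySetD are exact here
def waveStep (l : List Int) (i : Int) : List Int :=
  if PySem.Int.mod (PySem.List.pyGetD l i 0) 2 = 0 then
    if PySem.Int.mod (PySem.List.pyGetD l (i + 1) 0) 2 ≠ 0 then
      PySem.List.pySetD (PySem.List.pySetD l i (PySem.List.pyGetD l (i + 1) 0)) (i + 1)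
        (PySem.List.pyGetD l i 0)
    else l
  else
    if PySem.Int.mod (PySem.List.pyGetD l (i + 1) 0) 2 = 0 then
      PySem.List.pySetD (PySem.List.pySetD l i (PySem.List.pyGetD l (i + 1) 0)) (i + 1)
        (PySem.List.pyGetD l i 0)
    else l

def waveYourFlag (arr : List Int) : List Int :=
  (PySem.List.pyRange 0 ((arr.length : Int) - 1) 1).foldl waveStep arr

-- ===== PORT B =====
-- loop body of B: state = (carry, result); arr[1:] is the tail
def waveAltStep (s : Int × List Int) (e : Int) : Int × List Int :=
  if PySem.Int.mod s.1 2 ≠ PySem.Int.mod e 2 then (s.1, s.2 ++ [e])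
  else (e, s.2 ++ [s.1])

def waveYourFlag_alt (arr : List Int) : List Int :=
  match arr with
  | [] => arr
  | a0 :: rest =>
    let p := rest.foldl waveAltStep (a0, ([] : List Int))
    p.2 ++ [p.1]

-- ===== PRECONDITION & SPEC =====
def Spec_waveYourFlag (arr : List Int) (out : List Int) : Prop := out = waveYourFlag_alt arr
instance (arr : List Int) (out : List Int) : Decidable (Spec_waveYourFlag arr out) := by unfold Spec_waveYourFlag; infer_instance

-- ===== CLAIM (what is proved, stated in full; the proofs are below) =====
def Claim_equal_waveYourFlag : Prop := ∀ (arr : List Int), Dom_waveYourFlag arr → Spec_waveYourFlag arr (waveYourFlag arr)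


-- ===== LEMMAS AND PROOFS =====

lemma pymod2 (c : Int) : PySem.Int.mod c 2 = c % 2 := by
  simp [PySem.Int.mod, Int.fmod_eq_emod]

-- reference recursion both ports are reduced to
def wave : List Int → List Int
  | [] => []
  | [x] => [x]
  | x :: y :: rest =>
    if x % 2 = y % 2 then x :: wave (y :: rest)
    else y :: wave (x :: rest)
termination_by l => l.length
decreasing_by all_goals (simp only [List.length_cons]; omega)

-- carry recursion (B's semantics)
def waveGo (c : Int) : List Int → List Int
  | [] => [c]
  | e :: rest =>
    if c % 2 ≠ e % 2 then e :: waveGo c rest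
    else c :: waveGo e rest

lemma waveGo_eq_wave (rest : List Int) (c : Int) : waveGo c rest = wave (c :: rest) := by
  induction rest generalizing c with
  | nil => simp [waveGo, wave]
  | cons e rest ih =>
    simp only [waveGo, wave]
    by_cases h : c % 2 = e % 2 <;> simp [h, ih]

lemma foldl_waveAltStep (rest : List Int) (c : Int) (res : List Int) :
    (rest.foldl waveAltStep (c, res)).2 ++ [(rest.foldl waveAltStep (c, res)).1]
      = res ++ waveGo c rest := by
  induction rest generalizing c res with
  | nil => simp [waveGo]
  | cons e rest ih =>
    simp only [List.foldl_cons, waveAltStep, waveGo, pymod2]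
    by_cases h : c % 2 = e % 2 <;> simp [h, ih]

lemma alt_eq_wave (arr : List Int) : waveYourFlag_alt arr = wave arr := by
  cases arr with
  | nil => simp [waveYourFlag_alt, wave]
  | cons a0 rest =>
    simp only [waveYourFlag_alt]
    rw [foldl_waveAltStep rest a0 []]
    simp [waveGo_eq_wave]

-- A's loop body at a Nat index
def waveStepN (l : List Int) (k : Nat) : List Int := waveStep l (k : Int)

lemma waveStepN_succ (x : Int) (xs : List Int) (k : Nat) :
    waveStepN (x :: xs) (k + 1) = x :: waveStepN xs k := by
  simp only [waveStepN, waveStep]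
  push_cast
  simp only [← Nat.cast_succ, PySem.List.pyGetD_natCast, PySem.List.pySetD_natCast]
  simp only [Nat.succ_eq_add_one, List.getD_cons_succ, List.set_cons_succ]
  split_ifs <;> rfl

lemma foldl_waveStepN_shift (m : Nat) (x : Int) (xs : List Int) :
    ((List.range m).map Nat.succ).foldl waveStepN (x :: xs)
      = x :: (List.range m).foldl waveStepN xs := by
  induction m generalizing xs with
  | zero => simp
  | succ m ih =>
    rw [List.range_succ]
    simp only [List.map_append, List.foldl_append, ih, List.map_cons, List.map_nil,
      List.foldl_cons, List.foldl_nil, Nat.succ_eq_add_one, waveStepN_succ]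

lemma waveStepN_zero (x y : Int) (rest : List Int) :
    waveStepN (x :: y :: rest) 0
      = if x % 2 = y % 2 then x :: y :: rest else y :: x :: rest := by
  simp only [waveStepN, waveStep, Nat.cast_zero, pymod2]
  have hx : PySem.List.pyGetD (x :: y :: rest) 0 0 = x := by
    rw [PySem.List.pyGetD_of_nonneg _ _ (by omega)]; rfl
  have hy : PySem.List.pyGetD (x :: y :: rest) (0 + 1) 0 = y := by
    rw [PySem.List.pyGetD_of_nonneg _ _ (by omega)]; rfl
  have hs1 : PySem.List.pySetD (x :: y :: rest) 0 y = y :: y :: rest := by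
    rw [PySem.List.pySetD_of_nonneg _ _ (by omega)]; rfl
  have hs2 : PySem.List.pySetD (y :: y :: rest) (0 + 1) x = y :: x :: rest := by
    rw [PySem.List.pySetD_of_nonneg _ _ (by omega)]; rfl
  rw [hx, hy, hs1, hs2]
  have hmx := Int.emod_two_eq x
  have hmy := Int.emod_two_eq y
  by_cases h1 : x % 2 = 0 <;> by_cases h2 : y % 2 = 0 <;>
    simp [h1, h2] <;> omega

lemma a_foldN (arr : List Int) :
    waveYourFlag arr = (List.range (arr.length - 1)).foldl waveStepN arr := by
  unfold waveYourFlag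
  rw [PySem.List.pyRange_one, List.foldl_map]
  have h1 : ((arr.length : Int) - 1 - 0).toNat = arr.length - 1 := by omega
  rw [h1]
  simp only [zero_add]
  rfl

lemma a_eq_wave (arr : List Int) : waveYourFlag arr = wave arr := by
  rw [a_foldN]
  generalize hn : arr.length = n
  induction n generalizing arr with
  | zero =>
    rw [List.length_eq_zero_iff] at hn
    subst hn
    simp [wave]
  | succ m ih =>
    match arr, hn with
    | [x], hx =>
      have hm : m = 0 := by simpa using hx.symm
      subst hm
      simp [wave]
    | x :: y :: rest, hn =>
      simp only [List.length_cons] at hn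
      have hm : m = rest.length + 1 := by omega
      subst hm
      have hlen : rest.length + 1 + 1 - 1 = rest.length + 1 := by omega
      rw [hlen, List.range_succ_eq_map, List.foldl_cons, waveStepN_zero]
      by_cases h : x % 2 = y % 2
      · rw [if_pos h, foldl_waveStepN_shift]
        have hih := ih (y :: rest) (by simp)
        simp only [Nat.add_sub_cancel] at hih
        rw [hih]
        conv_rhs => rw [wave]
        rw [if_pos h]
      · rw [if_neg h, foldl_waveStepN_shift]
        have hih := ih (x :: rest) (by simp)
        simp only [Nat.add_sub_cancel] at hih
        rw [hih]
        conv_rhs => rw [wave]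
        rw [if_neg h]

-- ===== VERDICT (by name: the statement is the Claim_ definition above) =====
theorem waveYourFlag_spec : Claim_equal_waveYourFlag := by
  intro arr _
  unfold Spec_waveYourFlag
  rw [a_eq_wave, alt_eq_wave]
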